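-- pv_equiv track=rewrite | github.com/HarryS561/dontstarve-huijiwiki-scripts | Strings/update_strings.py | build_buckets
-- ===== SOURCE A (Python) =====
-- def build_buckets(code_map: dict, bucket_map: dict):
--     buckets = {}
--     for key, val in code_map.items():
--         b = bucket_map.get(key)
--         if b is None:
--             continue
--         m = buckets.get(b)
--         if m is None:
--             m = {}
--             buckets[b] = m
--         m[key] = val
--     return buckets
-- ===== SOURCE B (Python) =====
-- def build_buckets(code_map: dict, bucket_map: dict):
--     # Two-pass group-by: first collect the (bucket, key, val) triples, then
--     # build each bucket's dict by filtering the triples per distinct bucket.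
--     pairs = [(b, key, val) for key, val in code_map.items()
--              if (b := bucket_map.get(key)) is not None]
--     order = list(dict.fromkeys(b for b, _, _ in pairs))
--     return {b: {k: v for b2, k, v in pairs if b2 == b} for b in order}
-- ===== Notes on version B (the rewrite author's own statement) =====
-- stated objective: alternative
-- what changed: Replaces A's single pass that mutates a dict-of-dicts via get/insert with a declarative two-pass group-by: collect (bucket,key,val) triples, dedupe the bucket order with dict.fromkeys, then build each bucket by a filtering comprehension over the triples.
import Mathlib
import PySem

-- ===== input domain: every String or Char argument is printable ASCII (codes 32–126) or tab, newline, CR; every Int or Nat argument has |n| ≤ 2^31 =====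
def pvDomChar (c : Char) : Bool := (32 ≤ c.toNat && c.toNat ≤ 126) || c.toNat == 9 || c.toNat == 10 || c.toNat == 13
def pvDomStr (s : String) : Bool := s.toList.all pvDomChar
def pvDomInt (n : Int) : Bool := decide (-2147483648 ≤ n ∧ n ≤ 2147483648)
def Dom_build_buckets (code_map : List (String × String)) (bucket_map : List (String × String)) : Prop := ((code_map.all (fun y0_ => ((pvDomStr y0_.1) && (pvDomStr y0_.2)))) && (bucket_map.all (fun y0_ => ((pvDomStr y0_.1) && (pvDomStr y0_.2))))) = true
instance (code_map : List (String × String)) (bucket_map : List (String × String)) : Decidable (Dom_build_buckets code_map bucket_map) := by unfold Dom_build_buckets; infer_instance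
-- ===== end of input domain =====

-- B replaces A's mutating single pass with a two-pass group-by (collect triples, dedupe bucket order, filter per bucket): an alternative decomposition, not faster.


-- ===== PORT A =====
-- one loop iteration of A: b = bucket_map.get(key); if b is None: continue; m = buckets.get(b); if m is None: m = {}; buckets[b] = m; m[key] = val
def bbStep (bucket_map : List (String × String)) (buckets : PySem.Dict String (PySem.Dict String String)) (kv : String × String) : PySem.Dict String (PySem.Dict String String) :=
  match (PySem.Dict.mk bucket_map).get? kv.1 with
  | none => buckets
  | some b =>
    match buckets.get? b with
    | none => buckets.insert b (PySem.Dict.empty.insert kv.1 kv.2)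
    | some m => buckets.insert b (m.insert kv.1 kv.2)

def build_buckets (code_map : List (String × String)) (bucket_map : List (String × String)) : List (String × List (String × String)) :=
  ((code_map.foldl (bbStep bucket_map) PySem.Dict.empty).items.map (fun p => (p.1, p.2.items)))

-- ===== PORT B =====
def build_buckets_alt (code_map : List (String × String)) (bucket_map : List (String × String)) : List (String × List (String × String)) :=
  let pairs := code_map.filterMap (fun kv => ((PySem.Dict.mk bucket_map).get? kv.1).map (fun b => (b, kv)))
  let order := PySem.List.dedup (pairs.map (·.1))
  order.map (fun b => (b, (pairs.filter (fun q => q.1 == b)).map (·.2)))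

-- ===== PRECONDITION & SPEC =====
-- Pre_ excludes association lists with duplicate keys: they do not represent Python dicts
-- (dict() would merge them), so A's value on them is an artefact of the list encoding.
def Pre_build_buckets (code_map : List (String × String)) (bucket_map : List (String × String)) : Prop :=
  (code_map.map (·.1)).Nodup ∧ (bucket_map.map (·.1)).Nodup
instance (code_map : List (String × String)) (bucket_map : List (String × String)) : Decidable (Pre_build_buckets code_map bucket_map) := by unfold Pre_build_buckets; infer_instance
def pvWitness_build_buckets : (List (String × String)) × (List (String × String)) :=
  ([("spear", "Spear"), ("log", "Log"), ("axe", "Axe")], [("spear", "weapons"), ("axe", "tools"), ("log", "tools")])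
def Spec_build_buckets (code_map : List (String × String)) (bucket_map : List (String × String)) (out : List (String × List (String × String))) : Prop := out = build_buckets_alt code_map bucket_map
instance (code_map : List (String × String)) (bucket_map : List (String × String)) (out : List (String × List (String × String))) : Decidable (Spec_build_buckets code_map bucket_map out) := by unfold Spec_build_buckets; infer_instance

-- ===== CLAIM (what is proved, stated in full; the proofs are below) =====
def Claim_equal_build_buckets : Prop := ∀ (code_map : List (String × String)) (bucket_map : List (String × String)), Dom_build_buckets code_map bucket_map → Pre_build_buckets code_map bucket_map → Spec_build_buckets code_map bucket_map (build_buckets code_map bucket_map)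

-- ===== LEMMAS AND PROOFS =====

-- the inner dict of bucket b, as B builds it from the triples
def bbFilt (ps : List (String × String × String)) (b : String) : List (String × String) :=
  (ps.filter (fun q => q.1 == b)).map (·.2)

-- the grouping of a triple list as a dict-of-dicts
def bbG (ps : List (String × String × String)) : PySem.Dict String (PySem.Dict String String) :=
  PySem.Dict.mk ((PySem.Set.ofList (ps.map (·.1))).map (fun b => (b, PySem.Dict.mk (bbFilt ps b))))

lemma bbG_keys (ps : List (String × String × String)) : (bbG ps).keys = PySem.Set.ofList (ps.map (·.1)) := by
  simp [bbG, PySem.Dict.keys_mk, List.map_map, Function.comp_def]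

lemma bbG_keys_nodup (ps : List (String × String × String)) : (bbG ps).keys.Nodup := by
  rw [bbG_keys]; exact PySem.Set.nodup_ofList _

lemma bbG_get?_none (ps : List (String × String × String)) (b : String)
    (h : b ∉ ps.map (·.1)) : (bbG ps).get? b = none := by
  rw [PySem.Dict.get?_eq_none_iff_not_mem_keys, bbG_keys]
  simpa [PySem.Set.mem_ofList] using h

lemma bbG_get?_some (ps : List (String × String × String)) (b : String)
    (h : b ∈ ps.map (·.1)) : (bbG ps).get? b = some (PySem.Dict.mk (bbFilt ps b)) := by
  apply PySem.Dict.get?_of_mem_items _ _ (bbG_keys_nodup ps)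
  show _ ∈ (PySem.Set.ofList (ps.map (·.1))).map _
  exact List.mem_map_of_mem ((PySem.Set.mem_ofList _ _).2 h)

lemma bbFilt_append (ps : List (String × String × String)) (b : String) (q : String × String × String) :
    bbFilt (ps ++ [q]) b = bbFilt ps b ++ (if q.1 = b then [q.2] else []) := by
  by_cases h : q.1 = b <;> simp [bbFilt, List.filter_append, h]

lemma bbFilt_nil_of_not_mem (ps : List (String × String × String)) (b : String)
    (h : b ∉ ps.map (·.1)) : bbFilt ps b = [] := by
  have : ps.filter (fun q => q.1 == b) = [] := by
    apply List.filter_eq_nil_iff.2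
    intro q hq
    simp only [beq_iff_eq]
    exact fun e => h (e ▸ List.mem_map_of_mem hq)
  simp [bbFilt, this]

lemma ofList_append_singleton (l : List String) (b : String) :
    PySem.Set.ofList (l ++ [b]) = (if b ∈ l then PySem.Set.ofList l else PySem.Set.ofList l ++ [b]) := by
  rw [PySem.Set.ofList_append, PySem.Set.update_cons, PySem.Set.update_nil]
  by_cases h : b ∈ l <;>
    simp [PySem.Set.add, PySem.Set.contains, PySem.Set.mem_ofList, h]

-- one step of A's loop, applied to a grouping, extends the grouping by the new triple
lemma bbStep_snoc (bucket_map : List (String × String)) (ps : List (String × String × String))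
    (kv : String × String) (b : String)
    (hb : (PySem.Dict.mk bucket_map).get? kv.1 = some b)
    (hfresh : kv.1 ∉ ps.map (·.2.1)) :
    bbStep bucket_map (bbG ps) kv = bbG (ps ++ [(b, kv)]) := by
  have hmkeys : ∀ b', kv.1 ∉ (bbFilt ps b').map (·.1) := by
    intro b' hmem
    apply hfresh
    rcases List.mem_map.1 hmem with ⟨p, hp, hp1⟩
    rcases List.mem_map.1 hp with ⟨q, hq, hq2⟩
    refine List.mem_map.2 ⟨q, List.mem_of_mem_filter hq, ?_⟩
    show q.2.1 = kv.1
    rw [hq2]; exact hp1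
  by_cases hmem : b ∈ ps.map (·.1)
  · -- bucket already present: inner insert appends, outer insert overwrites in place
    have hinner : (PySem.Dict.mk (bbFilt ps b)).insert kv.1 kv.2 = PySem.Dict.mk (bbFilt ps b ++ [(kv.1, kv.2)]) := by
      apply PySem.Dict.ext
      rw [PySem.Dict.items_insert_of_not_contains]
      rw [PySem.Dict.contains_mk]
      apply List.any_eq_false.2
      intro p hp e
      exact hmkeys b (List.mem_map.2 ⟨p, hp, eq_of_beq e⟩)
    have hcont : (bbG ps).contains b = true := by
      rw [PySem.Dict.contains_eq_decide_mem_keys, bbG_keys]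
      simp [PySem.Set.mem_ofList, hmem]
    apply PySem.Dict.ext
    rw [show bbStep bucket_map (bbG ps) kv = (bbG ps).insert b ((PySem.Dict.mk (bbFilt ps b)).insert kv.1 kv.2) by
          simp [bbStep, hb, bbG_get?_some ps b hmem]]
    rw [PySem.Dict.items_insert_of_contains _ _ hcont, hinner]
    show List.map _ ((PySem.Set.ofList (ps.map (·.1))).map _) = (bbG (ps ++ [(b, kv)])).items
    have hord : PySem.Set.ofList ((ps ++ [(b, kv)]).map (·.1)) = PySem.Set.ofList (ps.map (·.1)) := by
      rw [List.map_append]; simp [ofList_append_singleton, hmem]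
    show _ = (PySem.Set.ofList ((ps ++ [(b, kv)]).map (·.1))).map (fun b' => (b', PySem.Dict.mk (bbFilt (ps ++ [(b, kv)]) b')))
    rw [hord, List.map_map]
    apply List.map_congr_left
    intro b' hb'
    by_cases e : b' = b
    · subst e; simp [bbFilt_append]
    · have e' : ¬ b = b' := fun h => e h.symm
      simp [e, e', bbFilt_append]
  · -- new bucket: outer insert appends a fresh singleton inner dict
    have hcont : (bbG ps).contains b = false := by
      rw [PySem.Dict.contains_eq_decide_mem_keys, bbG_keys]
      simp [PySem.Set.mem_ofList, hmem]
    apply PySem.Dict.ext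
    rw [show bbStep bucket_map (bbG ps) kv = (bbG ps).insert b (PySem.Dict.empty.insert kv.1 kv.2) by
          simp [bbStep, hb, bbG_get?_none ps b hmem]]
    rw [PySem.Dict.items_insert_of_not_contains _ _ hcont]
    show (bbG ps).items ++ _ = (bbG (ps ++ [(b, kv)])).items
    have hord : PySem.Set.ofList ((ps ++ [(b, kv)]).map (·.1)) = PySem.Set.ofList (ps.map (·.1)) ++ [b] := by
      rw [List.map_append]; simp [ofList_append_singleton, hmem]
    show _ = (PySem.Set.ofList ((ps ++ [(b, kv)]).map (·.1))).map (fun b' => (b', PySem.Dict.mk (bbFilt (ps ++ [(b, kv)]) b')))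
    rw [hord, List.map_append]
    congr 1
    · apply List.map_congr_left
      intro b' hb'
      have hb'mem : b' ∈ ps.map (·.1) := (PySem.Set.mem_ofList _ _).1 hb'
      have e : ¬ (b = b') := fun h => hmem (h ▸ hb'mem)
      simp [bbFilt_append, e]
    · have : PySem.Dict.empty.insert kv.1 kv.2 = PySem.Dict.mk [(kv.1, kv.2)] := rfl
      simp [this, bbFilt_append, bbFilt_nil_of_not_mem ps b hmem]

def bbTriples (bucket_map : List (String × String)) (code_map : List (String × String)) : List (String × String × String) :=
  code_map.filterMap (fun kv => ((PySem.Dict.mk bucket_map).get? kv.1).map (fun b => (b, kv)))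

-- loop invariant: folding A's step over the remaining entries extends the grouping of the processed triples
lemma bb_main (bucket_map : List (String × String)) :
    ∀ (cm : List (String × String)) (ps : List (String × String × String)),
      (cm.map (·.1)).Nodup → (∀ kv ∈ cm, kv.1 ∉ ps.map (·.2.1)) →
      cm.foldl (bbStep bucket_map) (bbG ps) = bbG (ps ++ bbTriples bucket_map cm) := by
  intro cm
  induction cm with
  | nil => intro ps _ _; simp [bbTriples]
  | cons kv rest ih =>
    intro ps hnd hfresh
    have hnd' : (rest.map (·.1)).Nodup := (List.nodup_cons.1 (by simpa using hnd)).2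
    have hne : kv.1 ∉ rest.map (·.1) := (List.nodup_cons.1 (by simpa using hnd)).1
    cases hbm : (PySem.Dict.mk bucket_map).get? kv.1 with
    | none =>
      have hstep : bbStep bucket_map (bbG ps) kv = bbG ps := by simp [bbStep, hbm]
      have htr : bbTriples bucket_map (kv :: rest) = bbTriples bucket_map rest := by
        simp [bbTriples, hbm]
      rw [List.foldl_cons, hstep, htr]
      exact ih ps hnd' (fun kv' h => hfresh kv' (List.mem_cons_of_mem _ h))
    | some b =>
      have hstep := bbStep_snoc bucket_map ps kv b hbm (hfresh kv (List.mem_cons_self ..))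
      have htr : bbTriples bucket_map (kv :: rest) = (b, kv) :: bbTriples bucket_map rest := by
        simp [bbTriples, hbm]
      rw [List.foldl_cons, hstep, htr]
      have := ih (ps ++ [(b, kv)]) hnd' (by
        intro kv' h
        simp only [List.map_append, List.mem_append]
        rintro (h1 | h2)
        · exact hfresh kv' (List.mem_cons_of_mem _ h) h1
        · simp only [List.map_cons, List.map_nil, List.mem_singleton] at h2
          exact hne (h2 ▸ List.mem_map_of_mem h))
      rw [this, List.append_assoc]
      rfl

-- ===== VERDICT (by name: the statement is the Claim_ definition above) =====
theorem build_buckets_spec : Claim_equal_build_buckets := by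
  intro code_map bucket_map _ hpre
  show build_buckets code_map bucket_map = build_buckets_alt code_map bucket_map
  have h0 : (PySem.Dict.empty : PySem.Dict String (PySem.Dict String String)) = bbG [] := rfl
  have := bb_main bucket_map code_map [] hpre.1 (by simp)
  rw [build_buckets, h0, this]
  simp [build_buckets_alt, bbG, bbTriples, bbFilt, List.map_map, Function.comp, PySem.List.dedup]
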